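-- pv_equiv track=rewrite | github.com/bbubbush/algorism | BOJ/2981.py | spot_check
-- ===== SOURCE A (Python) =====
-- import math
--
-- def spot_check(n, number_list):
--     distance_list = []
--
--     # init distance_list
--     for i in range(1, n):
--         distance_list.append(number_list[i] - number_list[i-1])
--
--     # get gcd
--     gcd = distance_list[0]
--     for distance in distance_list:
--         gcd = math.gcd(gcd, distance)
--
--
--     answer = []
--     answer.append(gcd)
--     for i in range(2, int(math.sqrt(gcd))+1):
--         if gcd % i == 0:
--             answer.append(i)
--             if i != gcd//i:
--                 answer.append(gcd//i)
--
--     answer.sort()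
--     return ' '.join(map(str, answer))
-- ===== SOURCE B (Python) =====
-- import math
--
-- def spot_check(n, number_list):
--     diffs = [number_list[i] - number_list[i - 1] for i in range(1, n)]
--     g = diffs[0]
--     for d in diffs:
--         g = math.gcd(g, d)
--     if g < 2:
--         return str(g)
--     # prime factorisation of g by trial division
--     factors = []
--     m, p = g, 2
--     while p * p <= m:
--         e = 0
--         while m % p == 0:
--             m //= p
--             e += 1
--         if e:
--             factors.append((p, e))
--         p += 1
--     if m > 1:
--         factors.append((m, 1))
--     # every divisor of g is a product of one power of each prime factor
--     divisors = [1]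
--     for prime, exp in factors:
--         divisors = [d * prime ** k for d in divisors for k in range(exp + 1)]
--     divisors.sort()
--     return ' '.join(map(str, divisors[1:]))
-- ===== Notes on version B (the rewrite author's own statement) =====
-- stated objective: alternative
-- what changed: B keeps A's gcd-of-consecutive-differences phase but replaces the divisor search entirely: instead of trial-dividing up to sqrt(g) while collecting divisor/cofactor pairs and sorting them, B computes the prime factorisation of g by trial division and generates every divisor as a product of one power of each prime factor, then sorts and drops the leading 1.
import Mathlib
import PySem

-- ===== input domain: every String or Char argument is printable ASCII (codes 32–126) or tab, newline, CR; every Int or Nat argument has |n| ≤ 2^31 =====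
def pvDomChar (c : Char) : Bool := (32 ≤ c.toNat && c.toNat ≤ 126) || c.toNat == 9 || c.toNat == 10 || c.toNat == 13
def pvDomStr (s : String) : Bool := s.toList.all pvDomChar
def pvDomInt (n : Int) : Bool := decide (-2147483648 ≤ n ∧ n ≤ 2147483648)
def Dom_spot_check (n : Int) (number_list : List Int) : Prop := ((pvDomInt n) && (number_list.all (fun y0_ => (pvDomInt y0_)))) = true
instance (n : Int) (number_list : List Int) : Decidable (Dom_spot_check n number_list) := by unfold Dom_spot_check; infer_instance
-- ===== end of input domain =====

-- B replaces A's sqrt-bounded divisor/cofactor search by a different algorithm: it computes the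
-- prime factorisation of the gcd by trial division and generates every divisor as a product of
-- prime powers, then sorts and drops the leading 1 (objective: alternative, same cost).

-- ===== PORT A =====
-- 'int(math.sqrt(gcd))' is ported as Nat.sqrt, which is exact here: on Dom_ the gcd is ≤ 2^32 and
-- CPython's float sqrt truncates to the integer square root for all such values.
def spot_check (n : Int) (number_list : List Int) : String :=
  let distance_list : List Int :=
    (PySem.List.pyRange 1 n 1).foldl
      (fun dl i => dl ++ [PySem.List.pyGetD number_list i 0 - PySem.List.pyGetD number_list (i - 1) 0]) []
  let gcd0 : Int := PySem.List.pyGetD distance_list 0 0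
  let g : Int := distance_list.foldl (fun acc d => (Int.gcd acc d : Int)) gcd0
  let answer : List Int :=
    (PySem.List.pyRange 2 ((Nat.sqrt g.toNat : Int) + 1) 1).foldl
      (fun ans i =>
        if PySem.Int.mod g i = 0 then
          let ans := ans ++ [i]
          if i ≠ PySem.Int.floordiv g i then ans ++ [PySem.Int.floordiv g i] else ans
        else ans)
      [g]
  PySem.Str.join " " ((PySem.List.sorted answer (fun x => x) false).map PySem.Int.toStr)

-- ===== PORT B =====
-- the inner 'while m % p == 0' loop of Source B, made total by structural fuel (m shrinks every
-- iteration, so fuel m.toNat + 1 is never exhausted on the inputs B reaches): returns (m, e)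
def altStripGo (fuel : Nat) (m p : Int) : Int × Int :=
  match fuel with
  | 0 => (m, 0)
  | fuel + 1 =>
    if PySem.Int.mod m p = 0 then
      let r := altStripGo fuel (PySem.Int.floordiv m p) p
      (r.1, r.2 + 1)
    else (m, 0)

def altStrip (m p : Int) : Int × Int := altStripGo (m.toNat + 1) m p

-- the outer 'while p * p <= m' loop of Source B, fuel likewise: returns (factor list, final m)
def altFacGo (fuel : Nat) (m p : Int) : List (Int × Int) × Int :=
  match fuel with
  | 0 => ([], m)
  | fuel + 1 =>
    if p * p ≤ m then
      let s := altStrip m p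
      let r := altFacGo fuel s.1 (p + 1)
      (if s.2 = 0 then r.1 else (p, s.2) :: r.1, r.2)
    else ([], m)

def altFac (m p : Int) : List (Int × Int) × Int := altFacGo (m.toNat + 2) m p

def spot_check_alt (n : Int) (number_list : List Int) : String :=
  let diffs : List Int :=
    (PySem.List.pyRange 1 n 1).map
      (fun i => PySem.List.pyGetD number_list i 0 - PySem.List.pyGetD number_list (i - 1) 0)
  let g : Int := diffs.foldl (fun acc d => (Int.gcd acc d : Int)) (PySem.List.pyGetD diffs 0 0)
  if g < 2 then PySem.Int.toStr g
  else
    let fr := altFac g 2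
    let factors : List (Int × Int) := if 1 < fr.2 then fr.1 ++ [(fr.2, 1)] else fr.1
    let divisors : List Int :=
      factors.foldl
        (fun divs pe => divs.flatMap (fun d => (PySem.List.pyRange 0 (pe.2 + 1) 1).map (fun k => d * pe.1 ^ k.toNat)))
        [1]
    PySem.Str.join " " (((PySem.List.sorted divisors (fun x => x) false).drop 1).map PySem.Int.toStr)

-- ===== PRECONDITION & SPEC =====
-- Pre_ is exactly where A returns: with n < 2 the difference list is empty and distance_list[0]
-- raises IndexError; with n > len(number_list) the loop building it raises IndexError.
def Pre_spot_check (n : Int) (number_list : List Int) : Prop :=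
  2 ≤ n ∧ n ≤ number_list.length
instance (n : Int) (number_list : List Int) : Decidable (Pre_spot_check n number_list) := by
  unfold Pre_spot_check; infer_instance
def pvWitness_spot_check : Int × List Int := (3, [2, 8, 14])

def Spec_spot_check (n : Int) (number_list : List Int) (out : String) : Prop := out = spot_check_alt n number_list
instance (n : Int) (number_list : List Int) (out : String) : Decidable (Spec_spot_check n number_list out) := by unfold Spec_spot_check; infer_instance

-- ===== CLAIM (what is proved, stated in full; the proofs are below) =====
def Claim_equal_spot_check : Prop := ∀ (n : Int) (number_list : List Int), Dom_spot_check n number_list → Pre_spot_check n number_list → Spec_spot_check n number_list (spot_check n number_list)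

-- ===== LEMMAS AND PROOFS =====

-- the gcd fold over the distances is non-negative
lemma gcd_fold_cast (l : List Int) (k : Nat) :
    l.foldl (fun acc d => (Int.gcd acc d : Int)) (k : Int)
      = ((l.foldl (fun acc d => Int.gcd (acc : Int) d) k : Nat) : Int) := by
  induction l generalizing k with
  | nil => rfl
  | cons d t ih => simpa using ih (Int.gcd (k : Int) d)

lemma gcd_fold_nonneg (l : List Int) :
    0 ≤ l.foldl (fun acc d => (Int.gcd acc d : Int)) (PySem.List.pyGetD l 0 0) := by
  cases l with
  | nil => decide
  | cons d t =>
    have h0 : PySem.List.pyGetD (d :: t) 0 0 = d := by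
      simp [PySem.List.pyGetD, PySem.List.pyIdx?, PySem.List.pyGet?]
    rw [h0]
    show 0 ≤ (d :: t).foldl (fun acc x => (Int.gcd acc x : Int)) d
    simp only [List.foldl_cons]
    rw [gcd_fold_cast]
    exact Int.natCast_nonneg _

-- A's divisor loop as a flatMap
lemma A_answer_flatMap (g : Int) (R : List Int) (acc : List Int) :
    R.foldl
      (fun ans i =>
        if PySem.Int.mod g i = 0 then
          let ans := ans ++ [i]
          if i ≠ PySem.Int.floordiv g i then ans ++ [PySem.Int.floordiv g i] else ans
        else ans) acc
      = acc ++ R.flatMap (fun i =>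
          if PySem.Int.mod g i = 0 then
            (if i ≠ PySem.Int.floordiv g i then [i, PySem.Int.floordiv g i] else [i])
          else []) := by
  have hbody : (fun (ans : List Int) (i : Int) =>
        if PySem.Int.mod g i = 0 then
          let ans := ans ++ [i]
          if i ≠ PySem.Int.floordiv g i then ans ++ [PySem.Int.floordiv g i] else ans
        else ans)
      = fun ans i => ans ++ (if PySem.Int.mod g i = 0 then
            (if i ≠ PySem.Int.floordiv g i then [i, PySem.Int.floordiv g i] else [i])
          else []) := by
    funext ans i
    split_ifs <;> simp
  rw [hbody, PySem.List.foldl_append_eq_flatMap]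

-- divisor-pair arithmetic (Nat side)
lemma cofactor_bounds (m i : Nat) (h2 : 2 ≤ i) (hd : i ∣ m) (hlt : i * i < m) :
    Nat.sqrt m < m / i ∧ m / i < m := by
  obtain ⟨q, hq⟩ := hd
  have hi0 : 0 < i := by omega
  have hqv : m / i = q := by rw [hq]; exact Nat.mul_div_cancel_left q hi0
  have hq0 : 0 < q := by nlinarith
  rw [hqv]
  constructor
  · by_contra h
    rw [not_lt] at h
    have hiq : i < q := by nlinarith
    have hs2 : Nat.sqrt m * Nat.sqrt m ≤ m := by simpa [pow_two] using Nat.sqrt_le' m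
    nlinarith
  · nlinarith

lemma div_strict_anti (n a b : Nat) (ha : a ∣ n) (hb : b ∣ n) (hab : a < b) (hn : 0 < n) (ha2 : 0 < a) :
    n / b < n / a := by
  obtain ⟨ca, hca⟩ := ha
  obtain ⟨cb, hcb⟩ := hb
  have h1 : n / a = ca := by rw [hca]; exact Nat.mul_div_cancel_left ca ha2
  have h2 : n / b = cb := by rw [hcb]; exact Nat.mul_div_cancel_left cb (by omega)
  rw [h1, h2]
  by_contra hc
  rw [not_lt] at hc
  have hca0 : 0 < ca := by nlinarith
  have hx : a * ca < b * ca := by exact Nat.mul_lt_mul_of_pos_right hab hca0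
  have hy : b * ca ≤ b * cb := Nat.mul_le_mul_left b hc
  linarith

-- a divisor i with 2 ≤ i ≤ √m differs from its cofactor iff i*i < m
lemma ne_cofactor_iff (m i : Nat) (hd : i ∣ m) (h2 : 2 ≤ i) (hs : i ≤ Nat.sqrt m) :
    (i ≠ m / i) ↔ i * i < m := by
  obtain ⟨c, hc⟩ := hd
  have h1 : m / i = c := by rw [hc]; exact Nat.mul_div_cancel_left c (by omega)
  have hle : i * i ≤ m := Nat.le_sqrt.mp hs
  rw [h1]
  constructor
  · intro hne
    have hnem : i * i ≠ m := by
      intro he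
      exact hne (Nat.eq_of_mul_eq_mul_left (by omega) (he.trans hc))
    omega
  · intro hlt heq
    rw [← heq] at hc
    omega

-- unpack an Int divisor taken from the trial range into Nat data
lemma range_divisor_facts (m : Nat) (i : Int) (h2 : 2 ≤ i) (hsle : i ≤ (Nat.sqrt m : Int))
    (hmod : PySem.Int.mod (m : Int) i = 0) :
    ∃ a : Nat, i = (a : Int) ∧ a ∣ m ∧ 2 ≤ a ∧ a ≤ Nat.sqrt m ∧
      PySem.Int.floordiv (m : Int) i = ((m / a : Nat) : Int) := by
  refine ⟨i.toNat, by omega, ?_, by omega, by omega, ?_⟩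
  · have hdvd : i ∣ (m : Int) := (PySem.Int.mod_eq_zero_iff_dvd _ _).mp hmod
    have h' : ((i.toNat : Int)) ∣ (m : Int) := by rwa [show (i.toNat : Int) = i by omega]
    exact_mod_cast h'
  · rw [show i = (i.toNat : Int) by omega]; exact PySem.Int.floordiv_natCast m i.toNat

-- the permutation between A's interleaved pairs and the small/large split
lemma perm_pairs {α : Type} (p q : α → Bool) (f : α → α)
    (e : α → List α) (he : ∀ a, e a = (if p a then [a] else []) ++ (if q a then [f a] else [])) :
    ∀ R : List α, (R.flatMap e).Perm (R.filter p ++ (R.filter q).map f) := by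
  intro R
  induction R with
  | nil => simp
  | cons a t ih =>
    simp only [List.flatMap_cons, List.filter_cons, he a]
    by_cases hp : p a <;> by_cases hq : q a <;> simp only [hp, hq, if_true,
      List.nil_append, List.cons_append, List.map_cons]
    · refine List.Perm.trans ?_ (List.Perm.cons a List.perm_middle.symm)
      exact ((ih.cons (f a)).cons a)
    · exact ih.cons a
    · refine List.Perm.trans ?_ List.perm_middle.symm
      exact ih.cons (f a)
    · exact ih

-- the strictly increasing list that A's sort produces (for gcd value m)
def smallL (m : Nat) : List Int :=
  (PySem.List.pyRange 2 ((Nat.sqrt m : Int) + 1) 1).filter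
    (fun i => decide (PySem.Int.mod (m : Int) i = 0))

def largeL (m : Nat) : List Int :=
  ((PySem.List.pyRange 2 ((Nat.sqrt m : Int) + 1) 1).filter
    (fun i => decide (PySem.Int.mod (m : Int) i = 0 ∧ i * i < (m : Int)))).map
    (PySem.Int.floordiv (m : Int))

def sList (m : Nat) : List Int := smallL m ++ (largeL m).reverse ++ [(m : Int)]

lemma mem_range_bounds (m : Nat) (i : Int)
    (hi : i ∈ PySem.List.pyRange 2 ((Nat.sqrt m : Int) + 1) 1) :
    2 ≤ i ∧ i ≤ (Nat.sqrt m : Int) := by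
  have := PySem.List.mem_pyRange_one.mp hi
  omega

lemma smallL_bounds (m : Nat) (a : Int) (ha : a ∈ smallL m) : 2 ≤ a ∧ a ≤ (Nat.sqrt m : Int) :=
  mem_range_bounds m a (List.mem_of_mem_filter ha)

lemma largeL_bounds (m : Nat) (b : Int) (hb : b ∈ largeL m) :
    (Nat.sqrt m : Int) < b ∧ b < (m : Int) := by
  obtain ⟨i, hi, rfl⟩ := List.mem_map.mp hb
  obtain ⟨hiR, hqi⟩ := List.mem_filter.mp hi
  obtain ⟨h2i, hsi⟩ := mem_range_bounds m i hiR
  obtain ⟨hmod, hlt⟩ := of_decide_eq_true hqi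
  obtain ⟨a, hae, hdvd, h2a, hsa, hfd⟩ := range_divisor_facts m i h2i hsi hmod
  have hlt' : a * a < m := by rw [hae] at hlt; exact_mod_cast hlt
  obtain ⟨hb1, hb2⟩ := cofactor_bounds m a h2a hdvd hlt'
  rw [hfd]
  exact ⟨by exact_mod_cast hb1, by exact_mod_cast hb2⟩

lemma sList_pairwise (m : Nat) (hm2 : 2 ≤ m) : (sList m).Pairwise (· < ·) := by
  have hm0 : 0 < m := by omega
  have hslt : ((Nat.sqrt m : Nat) : Int) < (m : Int) := by
    have := Nat.sqrt_lt_self (by omega : 1 < m)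
    exact_mod_cast this
  unfold sList
  apply List.pairwise_append.mpr
  refine ⟨?_, ?_, ?_⟩
  · apply List.pairwise_append.mpr
    refine ⟨?_, ?_, ?_⟩
    · exact (PySem.List.pairwise_lt_pyRange_one 2 _).filter _
    · apply List.pairwise_reverse.mpr
      apply List.pairwise_map.mpr
      refine List.Pairwise.imp_of_mem ?_ ((PySem.List.pairwise_lt_pyRange_one 2 _).filter _)
      intro i j hi hj hij
      obtain ⟨hiR, hqi⟩ := List.mem_filter.mp hi
      obtain ⟨hjR, hqj⟩ := List.mem_filter.mp hj
      obtain ⟨h2i, hsi⟩ := mem_range_bounds m i hiR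
      obtain ⟨h2j, hsj⟩ := mem_range_bounds m j hjR
      obtain ⟨hmodi, hlti⟩ := of_decide_eq_true hqi
      obtain ⟨hmodj, hltj⟩ := of_decide_eq_true hqj
      obtain ⟨a, hae, hdvda, h2a, hsa, hfda⟩ := range_divisor_facts m i h2i hsi hmodi
      obtain ⟨b, hbe, hdvdb, h2b, hsb, hfdb⟩ := range_divisor_facts m j h2j hsj hmodj
      rw [hfda, hfdb]
      have hab : a < b := by rw [hae, hbe] at hij; exact_mod_cast hij
      have := div_strict_anti m a b hdvda hdvdb hab hm0 (by omega)
      exact_mod_cast this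
    · intro a ha b hb
      obtain ⟨_, has⟩ := smallL_bounds m a ha
      have hb' := largeL_bounds m b (List.mem_reverse.mp hb)
      omega
  · simp
  · intro a ha b hb
    rw [List.mem_singleton] at hb
    subst hb
    rcases List.mem_append.mp ha with h | h
    · obtain ⟨_, has⟩ := smallL_bounds m a h
      omega
    · exact (largeL_bounds m a (List.mem_reverse.mp h)).2

-- the heart of the A side: A's sorted answer list is sList (case 2 ≤ m)
lemma sorted_core (m : Nat) (hm2 : 2 ≤ m) :
    PySem.List.sorted
        ((m : Int) :: (PySem.List.pyRange 2 ((Nat.sqrt m : Int) + 1) 1).flatMap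
          (fun i =>
            if PySem.Int.mod (m : Int) i = 0 then
              (if i ≠ PySem.Int.floordiv (m : Int) i then [i, PySem.Int.floordiv (m : Int) i] else [i])
            else [])) (fun x => x) false
      = sList m := by
  have hmemR := mem_range_bounds m
  -- pointwise equality of the two flatMap bodies on the range
  have hcong : (PySem.List.pyRange 2 ((Nat.sqrt m : Int) + 1) 1).flatMap
        (fun i =>
          if PySem.Int.mod (m : Int) i = 0 then
            (if i ≠ PySem.Int.floordiv (m : Int) i then [i, PySem.Int.floordiv (m : Int) i] else [i])
          else [])
      = (PySem.List.pyRange 2 ((Nat.sqrt m : Int) + 1) 1).flatMap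
        (fun i =>
          (if decide (PySem.Int.mod (m : Int) i = 0) then [i] else [])
          ++ (if decide (PySem.Int.mod (m : Int) i = 0 ∧ i * i < (m : Int))
              then [PySem.Int.floordiv (m : Int) i] else [])) := by
    apply List.flatMap_congr
    intro i hi
    obtain ⟨h2i, hsi⟩ := hmemR i hi
    by_cases hmod : PySem.Int.mod (m : Int) i = 0
    · obtain ⟨a, hae, hdvd, h2a, hsa, hfd⟩ := range_divisor_facts m i h2i hsi hmod
      subst hae
      have hne : ((a : Int) ≠ PySem.Int.floordiv (m : Int) (a : Int)) ↔
          (a : Int) * (a : Int) < (m : Int) := by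
        rw [hfd]
        constructor
        · intro hx
          have hx' : a ≠ m / a := by exact_mod_cast hx
          have := (ne_cofactor_iff m a hdvd h2a hsa).mp hx'
          exact_mod_cast this
        · intro hx
          have hx' : a * a < m := by exact_mod_cast hx
          have h := (ne_cofactor_iff m a hdvd h2a hsa).mpr hx'
          exact_mod_cast h
      by_cases hlt : (a : Int) * (a : Int) < (m : Int)
      · simp only [if_pos hmod, if_pos (hne.mpr hlt)]
        simp [hmod, hlt]
      · have heq : ¬ ((a : Int) ≠ PySem.Int.floordiv (m : Int) (a : Int)) :=
          fun hx => hlt (hne.mp hx)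
        rw [not_not] at heq
        simp only [if_pos hmod, if_neg (fun hx => hlt (hne.mp hx))]
        simp [hmod, hlt]
    · simp [hmod]
  apply PySem.List.sorted_eq_of_perm_of_pairwise_lt
  · -- the permutation
    have hpp := perm_pairs
      (fun i => decide (PySem.Int.mod (m : Int) i = 0))
      (fun i => decide (PySem.Int.mod (m : Int) i = 0 ∧ i * i < (m : Int)))
      (PySem.Int.floordiv (m : Int)) _ (fun a => rfl)
      (PySem.List.pyRange 2 ((Nat.sqrt m : Int) + 1) 1)
    rw [hcong]
    unfold sList
    refine (((List.reverse_perm _).append_left _).append_right _).trans ?_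
    refine (List.perm_append_singleton _ _).trans ?_
    exact (hpp.symm.cons _).symm.symm
  · exact sList_pairwise m hm2

-- ---------- B side: factorisation correctness ----------

-- the inner strip loop, on Nat data (any sufficient fuel)
lemma altStripGo_spec (fuel : Nat) : ∀ (m p : Nat), 2 ≤ p → 0 < m → m ≤ fuel →
    ∃ m' e : Nat, altStripGo fuel (m : Int) (p : Int) = ((m' : Int), (e : Int)) ∧
      m = m' * p ^ e ∧ ¬ (p ∣ m') ∧ 0 < m' := by
  induction fuel with
  | zero => intro m p hp hm hf; omega
  | succ fuel ih =>
    intro m p hp hm hf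
    by_cases hdvd : p ∣ m
    · have hmod : PySem.Int.mod (m : Int) (p : Int) = 0 :=
        (PySem.Int.mod_eq_zero_iff_dvd _ _).mpr (Int.natCast_dvd_natCast.mpr hdvd)
      have hlt : m / p < m := Nat.div_lt_self hm (by omega)
      have hpos : 0 < m / p := Nat.div_pos (Nat.le_of_dvd hm hdvd) (by omega)
      obtain ⟨m', e, heq, hprod, hnd, hm'⟩ := ih (m / p) p hp hpos (by omega)
      refine ⟨m', e + 1, ?_, ?_, hnd, hm'⟩
      · rw [altStripGo, if_pos hmod, PySem.Int.floordiv_natCast, heq]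
        simp
      · have : m / p * p = m := Nat.div_mul_cancel hdvd
        rw [pow_succ, ← mul_assoc, ← hprod, this]
    · have hnmod : ¬ PySem.Int.mod (m : Int) (p : Int) = 0 := by
        intro hmod
        exact hdvd (Int.natCast_dvd_natCast.mp ((PySem.Int.mod_eq_zero_iff_dvd _ _).mp hmod))
      exact ⟨m, 0, by rw [altStripGo, if_neg hnmod]; simp, by simp, hdvd, hm⟩

-- the strip wrapper with its actual fuel
lemma altStrip_spec (m p : Nat) (hp : 2 ≤ p) (hm : 0 < m) :
    ∃ m' e : Nat, altStrip (m : Int) (p : Int) = ((m' : Int), (e : Int)) ∧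
      m = m' * p ^ e ∧ ¬ (p ∣ m') ∧ 0 < m' := by
  have h := altStripGo_spec (m + 1) m p hp hm (by omega)
  simpa [altStrip] using h

-- the outer trial-division loop, on Nat data (any sufficient fuel)
lemma altFacGo_spec (k : Nat) : ∀ (m p : Nat), m + 2 ≤ k + p → 2 ≤ p → 0 < m →
    (∀ q, 2 ≤ q → q < p → ¬ q ∣ m) →
    ∃ (F : List (Nat × Nat)) (r : Nat),
      altFacGo k (m : Int) (p : Int) = (F.map (fun x => ((x.1 : Int), (x.2 : Int))), (r : Int)) ∧
      m = r * (F.map (fun x => x.1 ^ x.2)).prod ∧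
      (∀ x ∈ F, x.1.Prime ∧ 1 ≤ x.2 ∧ p ≤ x.1) ∧
      (F.map Prod.fst).Pairwise (· < ·) ∧
      (∀ x ∈ F, ¬ x.1 ∣ r) ∧
      r ∣ m ∧ 0 < r ∧
      (∀ q, 2 ≤ q → q * q ≤ r → ¬ q ∣ r) := by
  induction k with
  | zero =>
    intro m p hk h2 h0 hsmall
    have hpp : ¬ ((p : Nat) * p ≤ m) := by nlinarith
    refine ⟨[], m, by simp [altFacGo], by simp, by simp, by simp, by simp,
      dvd_refl m, h0, ?_⟩
    intro q hq2 hqq hqd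
    by_cases hqp : q < p
    · exact hsmall q hq2 hqp hqd
    · nlinarith
  | succ k ih =>
    intro m p hk h2 h0 hsmall
    by_cases hpp : (p : Nat) * p ≤ m
    · have hcond : (p : Int) * (p : Int) ≤ (m : Int) := by exact_mod_cast hpp
      obtain ⟨m', e, heq, hfact, hndvd, hm'⟩ := altStrip_spec m p h2 h0
      have hm'dvd : m' ∣ m := ⟨p ^ e, hfact⟩
      have hm'le : m' ≤ m := Nat.le_of_dvd h0 hm'dvd
      have hsmall' : ∀ q, 2 ≤ q → q < p + 1 → ¬ q ∣ m' := by
        intro q hq2 hqp hqd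
        by_cases hqlt : q < p
        · exact hsmall q hq2 hqlt (hqd.trans hm'dvd)
        · have : q = p := by omega
          subst this
          exact hndvd hqd
      obtain ⟨F, r, heqF, hprodF, hF, hFpw, hFr, hrdvd, hr0, hrsq⟩ :=
        ih m' (p + 1) (by omega) (by omega) hm' hsmall'
      have hstep : altFacGo (k + 1) (m : Int) (p : Int)
          = (if (e : Int) = 0 then F.map (fun x => ((x.1 : Int), (x.2 : Int)))
             else ((p : Int), (e : Int)) :: F.map (fun x => ((x.1 : Int), (x.2 : Int))), (r : Int)) := by
        rw [altFacGo, if_pos hcond]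
        rw [heq, show ((p : Int) + 1) = ((p + 1 : Nat) : Int) by push_cast; ring]
        show (if (e : Int) = 0 then (altFacGo k (m' : Int) ((p + 1 : Nat) : Int)).1
              else ((p : Int), (e : Int)) :: (altFacGo k (m' : Int) ((p + 1 : Nat) : Int)).1,
              (altFacGo k (m' : Int) ((p + 1 : Nat) : Int)).2) = _
        rw [heqF]
      by_cases he : e = 0
      · subst he
        have hmm' : m = m' := by simpa using hfact
        subst hmm'
        refine ⟨F, r, by rw [hstep]; simp, hprodF, ?_, hFpw, hFr, hrdvd, hr0, hrsq⟩
        intro x hx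
        obtain ⟨hp1, hp2, hp3⟩ := hF x hx
        exact ⟨hp1, hp2, by omega⟩
      · have hpdvdm : p ∣ m := by
          rw [hfact]
          exact Dvd.dvd.mul_left (dvd_pow_self p he) m'
        have hprime : p.Prime := by
          rw [Nat.prime_def_lt]
          refine ⟨h2, ?_⟩
          intro d hdp hdvd
          by_contra hd1
          have hd2 : 2 ≤ d := by
            rcases Nat.eq_zero_or_pos d with h | h
            · subst h; simp at hdvd; omega
            · omega
          exact hsmall d hd2 hdp (hdvd.trans hpdvdm)
        refine ⟨(p, e) :: F, r, ?_, ?_, ?_, ?_, ?_, hrdvd.trans hm'dvd, hr0, hrsq⟩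
        · rw [hstep, if_neg (by exact_mod_cast he)]
          simp
        · rw [hfact, hprodF]
          simp [List.prod_cons]
          ring
        · intro x hx
          rcases List.mem_cons.mp hx with h | h
          · rw [h]; exact ⟨hprime, by omega, le_refl p⟩
          · obtain ⟨hp1, hp2, hp3⟩ := hF x h
            exact ⟨hp1, hp2, by omega⟩
        · rw [List.map_cons]
          apply List.pairwise_cons.mpr
          refine ⟨?_, hFpw⟩
          intro b hb
          obtain ⟨x, hx, rfl⟩ := List.mem_map.mp hb
          exact lt_of_lt_of_le (by omega) (hF x hx).2.2
        · intro x hx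
          rcases List.mem_cons.mp hx with h | h
          · rw [h]
            intro hpr
            exact hndvd (hpr.trans hrdvd)
          · exact hFr x h
    · have hcond : ¬ ((p : Int) * (p : Int) ≤ (m : Int)) := fun hle => hpp (by exact_mod_cast hle)
      refine ⟨[], m, by rw [altFacGo, if_neg hcond]; simp, by simp, by simp, by simp, by simp,
        dvd_refl m, h0, ?_⟩
      intro q hq2 hqq hqd
      by_cases hqp : q < p
      · exact hsmall q hq2 hqp hqd
      · nlinarith

-- the trial-division wrapper with its actual fuel
lemma altFac_spec (m p : Nat) (h2 : 2 ≤ p) (h0 : 0 < m)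
    (hsmall : ∀ q, 2 ≤ q → q < p → ¬ q ∣ m) :
    ∃ (F : List (Nat × Nat)) (r : Nat),
      altFac (m : Int) (p : Int) = (F.map (fun x => ((x.1 : Int), (x.2 : Int))), (r : Int)) ∧
      m = r * (F.map (fun x => x.1 ^ x.2)).prod ∧
      (∀ x ∈ F, x.1.Prime ∧ 1 ≤ x.2 ∧ p ≤ x.1) ∧
      (F.map Prod.fst).Pairwise (· < ·) ∧
      (∀ x ∈ F, ¬ x.1 ∣ r) ∧
      r ∣ m ∧ 0 < r ∧
      (∀ q, 2 ≤ q → q * q ≤ r → ¬ q ∣ r) := by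
  have h := altFacGo_spec (m + 2) m p (by omega) h2 h0 hsmall
  simpa [altFac] using h

-- a number with no divisor up to its square root is 1 or prime
lemma one_or_prime (r : Nat) (h0 : 0 < r) (h : ∀ q, 2 ≤ q → q * q ≤ r → ¬ q ∣ r) :
    r = 1 ∨ r.Prime := by
  by_cases h1 : r = 1
  · exact Or.inl h1
  · right
    by_contra hnp
    have hmf := Nat.minFac_sq_le_self h0 hnp
    have hpq := Nat.minFac_prime h1
    exact h r.minFac hpq.two_le (by nlinarith [sq_nonneg r.minFac]) (Nat.minFac_dvd r)

-- products of one power of each distinct prime: the generated divisor list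
def divStep (divs : List Nat) (pe : Nat × Nat) : List Nat :=
  divs.flatMap (fun d => (List.range (pe.2 + 1)).map (fun k => d * pe.1 ^ k))

-- a divisor of P times a power of a fresh prime is uniquely decomposable
lemma decomp_unique (p d1 d2 k1 k2 : Nat) (hp : p.Prime)
    (h1 : ¬ p ∣ d1) (h2 : ¬ p ∣ d2) (h01 : 0 < d1) (h02 : 0 < d2)
    (heq : d1 * p ^ k1 = d2 * p ^ k2) : d1 = d2 ∧ k1 = k2 := by
  have e1 : (d1 * p ^ k1).factorization p = k1 := by
    rw [Nat.factorization_mul h01.ne' (pow_ne_zero k1 hp.pos.ne')]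
    simp [Nat.factorization_eq_zero_of_not_dvd h1, hp.factorization_pow]
  have e2 : (d2 * p ^ k2).factorization p = k2 := by
    rw [Nat.factorization_mul h02.ne' (pow_ne_zero k2 hp.pos.ne')]
    simp [Nat.factorization_eq_zero_of_not_dvd h2, hp.factorization_pow]
  have hk : k1 = k2 := by rw [← e1, heq, e2]
  subst hk
  exact ⟨Nat.eq_of_mul_eq_mul_right (pow_pos hp.pos k1) heq, rfl⟩

lemma divFold_aux (F : List (Nat × Nat)) : ∀ (P : Nat) (D : List Nat), 0 < P → D.Nodup →
    (∀ x, x ∈ D ↔ x ∣ P) →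
    (∀ x ∈ F, x.1.Prime ∧ 1 ≤ x.2) → (F.map Prod.fst).Nodup → (∀ x ∈ F, ¬ x.1 ∣ P) →
    (F.foldl divStep D).Nodup ∧
      ∀ x, x ∈ F.foldl divStep D ↔ x ∣ P * (F.map (fun y => y.1 ^ y.2)).prod := by
  induction F with
  | nil =>
    intro P D hP hD hDm _ _ _
    simpa using ⟨hD, hDm⟩
  | cons pe F ih =>
    intro P D hP hD hDm hprime hnd hdvd
    obtain ⟨p, e⟩ := pe
    obtain ⟨hp, he⟩ := hprime (p, e) List.mem_cons_self
    have hpP : ¬ p ∣ P := hdvd (p, e) List.mem_cons_self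
    have hD0 : ∀ d ∈ D, 0 < d := fun d hd => Nat.pos_of_dvd_of_pos ((hDm d).mp hd) hP
    have hDnp : ∀ d ∈ D, ¬ p ∣ d := by
      intro d hd hpd
      exact hpP (hpd.trans ((hDm d).mp hd))
    -- the one-step divisor list
    have hstep_nodup : (divStep D (p, e)).Nodup := by
      apply List.nodup_flatMap.mpr
      constructor
      · intro d hd
        refine List.Nodup.map ?_ (List.nodup_range)
        intro k1 k2 hkk
        have : p ^ k1 = p ^ k2 := Nat.eq_of_mul_eq_mul_left (hD0 d hd) hkk
        exact Nat.pow_right_injective hp.two_le this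
      · refine List.Pairwise.imp_of_mem ?_ hD
        intro d1 d2 hd1 hd2 hne x hx1 hx2
        obtain ⟨k1, _, rfl⟩ := List.mem_map.mp hx1
        obtain ⟨k2, _, h12⟩ := List.mem_map.mp hx2
        exact hne (decomp_unique p d1 d2 k1 k2 hp (hDnp d1 hd1) (hDnp d2 hd2)
          (hD0 d1 hd1) (hD0 d2 hd2) h12.symm).1
    have hstep_mem : ∀ x, x ∈ divStep D (p, e) ↔ x ∣ P * p ^ e := by
      intro x
      constructor
      · intro hx
        obtain ⟨d, hd, hx'⟩ := List.mem_flatMap.mp hx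
        obtain ⟨k, hk, rfl⟩ := List.mem_map.mp hx'
        exact mul_dvd_mul ((hDm d).mp hd) (pow_dvd_pow p (by simpa using Nat.lt_succ_iff.mp (List.mem_range.mp hk)))
      · intro hx
        have hx0 : x ≠ 0 := by
          intro h
          subst h
          exact absurd (Nat.eq_zero_of_zero_dvd hx) (Nat.mul_pos hP (pow_pos hp.pos e)).ne'
        set k := x.factorization p with hk
        set d := x / p ^ k with hd
        have hpk : p ^ k ∣ x := Nat.ordProj_dvd x p
        have hdk : d * p ^ k = x := Nat.div_mul_cancel hpk
        have hpd : ¬ p ∣ d := Nat.not_dvd_ordCompl hp hx0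
        have hd0 : 0 < d := by
          rcases Nat.eq_zero_or_pos d with h | h
          · exfalso; apply hx0; rw [← hdk, h, zero_mul]
          · exact h
        have hcop : d.Coprime (p ^ e) :=
          Nat.Coprime.pow_right e (Nat.coprime_comm.mp (hp.coprime_iff_not_dvd.mpr hpd))
        have hddvd : d ∣ P := by
          have : d ∣ P * p ^ e := dvd_trans ⟨p ^ k, hdk.symm⟩ hx
          have h2 : d ∣ (p ^ e) * P := by rwa [mul_comm] at this
          exact hcop.dvd_of_dvd_mul_left h2
        have hke : k ≤ e := by
          have h1 : p ^ k ∣ P * p ^ e := hpk.trans hx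
          have h2 : (p ^ k).Coprime P := Nat.Coprime.pow_left k (hp.coprime_iff_not_dvd.mpr hpP)
          have h3 : p ^ k ∣ p ^ e := h2.dvd_of_dvd_mul_left h1
          exact (Nat.pow_dvd_pow_iff_le_right hp.one_lt).mp h3
        refine List.mem_flatMap.mpr ⟨d, (hDm d).mpr hddvd, List.mem_map.mpr ⟨k, List.mem_range.mpr (by omega), hdk⟩⟩
    -- recurse
    have hrest : ∀ x ∈ F, ¬ x.1 ∣ P * p ^ e := by
      intro x hx hxd
      have hxp : x.1.Prime := (hprime x (List.mem_cons_of_mem _ hx)).1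
      have hxne : x.1 ≠ p := by
        intro h
        have : p ∈ F.map Prod.fst := List.mem_map.mpr ⟨x, hx, h⟩
        rw [List.map_cons] at hnd
        exact (List.nodup_cons.mp hnd).1 this
      rcases (hxp.dvd_mul).mp hxd with h | h
      · exact hdvd x (List.mem_cons_of_mem _ hx) h
      · exact hxne ((Nat.prime_dvd_prime_iff_eq hxp hp).mp (hxp.dvd_of_dvd_pow h))
    have := ih (P * p ^ e) (divStep D (p, e)) (Nat.mul_pos hP (pow_pos hp.pos e)) hstep_nodup hstep_mem
      (fun x hx => hprime x (List.mem_cons_of_mem _ hx))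
      (by rw [List.map_cons] at hnd; exact (List.nodup_cons.mp hnd).2)
      hrest
    rw [List.foldl_cons]
    refine ⟨this.1, ?_⟩
    intro x
    rw [this.2 x, List.map_cons, List.prod_cons, ← mul_assoc]

-- the Int fold of the port is the cast of the Nat fold
lemma fold_cast (F : List (Nat × Nat)) : ∀ (D : List Nat),
    (F.map (fun x => ((x.1 : Int), (x.2 : Int)))).foldl
        (fun divs pe => divs.flatMap (fun d => (PySem.List.pyRange 0 (pe.2 + 1) 1).map (fun k => d * pe.1 ^ k.toNat)))
        (D.map (fun d : Nat => (d : Int)))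
      = (F.foldl divStep D).map (fun d : Nat => (d : Int)) := by
  induction F with
  | nil => intro D; rfl
  | cons pe F ih =>
    intro D
    obtain ⟨p, e⟩ := pe
    have hone : (D.map (fun d : Nat => (d : Int))).flatMap
          (fun d => (PySem.List.pyRange 0 (((p : Int), (e : Int)).2 + 1) 1).map (fun k => d * ((p : Int), (e : Int)).1 ^ k.toNat))
        = (divStep D (p, e)).map (fun d : Nat => (d : Int)) := by
      unfold divStep
      simp only [List.flatMap_map, List.map_flatMap]
      apply List.flatMap_congr
      intro d _
      rw [show (((p : Int), (e : Int)).2 + 1) = ((e + 1 : Nat) : Int) by push_cast; ring,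
        PySem.List.pyRange_zero_natCast, List.map_map, List.map_map]
      apply List.map_congr_left
      intro k _
      simp only [Function.comp_apply, Int.toNat_natCast]
      push_cast
      ring
    rw [List.map_cons, List.foldl_cons, List.foldl_cons, hone, ih]

-- membership in sList: exactly the divisors 2 ≤ d of m
lemma mem_sList (m : Nat) (hm2 : 2 ≤ m) (x : Int) :
    x ∈ sList m ↔ ∃ d : Nat, 2 ≤ d ∧ d ∣ m ∧ x = (d : Int) := by
  have hm0 : 0 < m := by omega
  have hs1 : 1 ≤ Nat.sqrt m := Nat.sqrt_pos.mpr hm0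
  unfold sList
  rw [List.mem_append, List.mem_append, List.mem_reverse, List.mem_singleton]
  constructor
  · rintro ((h | h) | h)
    · obtain ⟨hiR, hq⟩ := List.mem_filter.mp h
      obtain ⟨h2i, hsi⟩ := mem_range_bounds m x hiR
      obtain ⟨a, hae, hdvd, h2a, _, _⟩ := range_divisor_facts m x h2i hsi (of_decide_eq_true hq)
      exact ⟨a, h2a, hdvd, hae⟩
    · obtain ⟨i, hi, rfl⟩ := List.mem_map.mp h
      obtain ⟨hiR, hq⟩ := List.mem_filter.mp hi
      obtain ⟨h2i, hsi⟩ := mem_range_bounds m i hiR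
      obtain ⟨hmod, hlt⟩ := of_decide_eq_true hq
      obtain ⟨a, hae, hdvd, h2a, hsa, hfd⟩ := range_divisor_facts m i h2i hsi hmod
      have hlt' : a * a < m := by rw [hae] at hlt; exact_mod_cast hlt
      obtain ⟨hb1, _⟩ := cofactor_bounds m a h2a hdvd hlt'
      refine ⟨m / a, by omega, ?_, hfd⟩
      exact ⟨a, (Nat.div_mul_cancel hdvd).symm⟩
    · exact ⟨m, hm2, dvd_refl m, h⟩
  · rintro ⟨d, h2d, hdvd, rfl⟩
    have hdm : d ≤ m := Nat.le_of_dvd hm0 hdvd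
    have hmod : PySem.Int.mod (m : Int) (d : Int) = 0 :=
      (PySem.Int.mod_eq_zero_iff_dvd _ _).mpr (Int.natCast_dvd_natCast.mpr hdvd)
    by_cases hds : d ≤ Nat.sqrt m
    · left; left
      refine List.mem_filter.mpr ⟨PySem.List.mem_pyRange_one.mpr ⟨by exact_mod_cast h2d, by omega⟩, ?_⟩
      exact decide_eq_true hmod
    · by_cases hdm' : d = m
      · right; exact congrArg _ hdm'
      · left; right
        have hdltm : d < m := lt_of_le_of_ne hdm hdm'
        set a := m / d with ha
        have haa : a * d = m := Nat.div_mul_cancel hdvd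
        have hadvd : a ∣ m := ⟨d, haa.symm⟩
        have ha2 : 2 ≤ a := by
          rcases Nat.lt_or_ge a 2 with h | h
          · interval_cases a <;> omega
          · exact h
        have hasq : a ≤ Nat.sqrt m := by
          have h1 : m / d ≤ m / (Nat.sqrt m + 1) := Nat.div_le_div_left (by omega) (by omega)
          have h2 : m / (Nat.sqrt m + 1) < Nat.sqrt m + 1 :=
            (Nat.div_lt_iff_lt_mul (by omega)).mpr (Nat.lt_succ_sqrt m)
          omega
        have hdd : m / a = d := Nat.div_div_self hdvd (by omega)
        have haa' : a * a < m := by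
          rcases Nat.lt_or_ge (a * a) m with h | h
          · exact h
          · exfalso
            have hsq : a * a ≤ m := Nat.le_sqrt.mp hasq
            have : a * a = m := by omega
            have : m / a = a := by rw [← this]; exact Nat.mul_div_cancel_left a (by omega)
            omega
        refine List.mem_map.mpr ⟨(a : Int), List.mem_filter.mpr ⟨?_, ?_⟩, ?_⟩
        · exact PySem.List.mem_pyRange_one.mpr ⟨by exact_mod_cast ha2, by omega⟩
        · refine decide_eq_true ?_
          constructor
          · exact (PySem.Int.mod_eq_zero_iff_dvd _ _).mpr (Int.natCast_dvd_natCast.mpr hadvd)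
          · exact_mod_cast haa'
        · rw [show ((a : Nat) : Int) = ((a : Nat) : Int) from rfl, PySem.Int.floordiv_natCast, hdd]

-- the whole B-side tail: sorted divisors = 1 :: sList m
lemma sorted_divisors (m : Nat) (hm2 : 2 ≤ m) :
    PySem.List.sorted
        ((if 1 < (altFac (m : Int) 2).2 then (altFac (m : Int) 2).1 ++ [((altFac (m : Int) 2).2, 1)]
          else (altFac (m : Int) 2).1).foldl
          (fun divs pe => divs.flatMap (fun d => (PySem.List.pyRange 0 (pe.2 + 1) 1).map (fun k => d * pe.1 ^ k.toNat)))
          [1]) (fun x => x) false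
      = 1 :: sList m := by
  have hm0 : 0 < m := by omega
  obtain ⟨F, r, heqF, hprod, hF, hFpw, hFr, hrdvd, hr0, hrsq⟩ :=
    altFac_spec m 2 (by omega) hm0 (fun q hq2 hqlt => by omega)
  rw [show (2 : Int) = ((2 : Nat) : Int) by norm_num, heqF]
  -- the full factor list, with the leftover prime r appended when 1 < r
  set F' : List (Nat × Nat) := if 1 < r then F ++ [(r, 1)] else F with hF'
  have hone := one_or_prime r hr0 hrsq
  have hcast : (if 1 < ((r : Nat) : Int) then
        F.map (fun x => ((x.1 : Int), (x.2 : Int))) ++ [(((r : Nat) : Int), 1)]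
        else F.map (fun x => ((x.1 : Int), (x.2 : Int))))
      = F'.map (fun x => ((x.1 : Int), (x.2 : Int))) := by
    by_cases hr1 : 1 < r
    · rw [if_pos (by exact_mod_cast hr1), hF', if_pos hr1, List.map_append]
      rfl
    · rw [if_neg (by exact_mod_cast hr1), hF', if_neg hr1]
  rw [hcast]
  have hFne : ∀ x ∈ F, x.1 ≠ r := by
    intro x hx heq
    exact hFr x hx (heq ▸ dvd_refl x.1)
  have hprime' : ∀ x ∈ F', x.1.Prime ∧ 1 ≤ x.2 := by
    intro x hx
    rw [hF'] at hx
    by_cases hr1 : 1 < r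
    · rw [if_pos hr1] at hx
      rcases List.mem_append.mp hx with h | h
      · exact ⟨(hF x h).1, (hF x h).2.1⟩
      · rw [List.mem_singleton] at h
        subst h
        rcases hone with h1 | h1
        · omega
        · exact ⟨h1, le_refl 1⟩
    · rw [if_neg hr1] at hx
      exact ⟨(hF x hx).1, (hF x hx).2.1⟩
  have hnd' : (F'.map Prod.fst).Nodup := by
    have hndF : (F.map Prod.fst).Nodup := hFpw.imp (fun h => ne_of_lt h)
    rw [hF']
    by_cases hr1 : 1 < r
    · rw [if_pos hr1, List.map_append]
      apply List.Nodup.append hndF (by simp)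
      intro a ha hb
      obtain ⟨x, hx, rfl⟩ := List.mem_map.mp ha
      simp at hb
      exact hFne x hx hb
    · rw [if_neg hr1]; exact hndF
  have hdvd1 : ∀ x ∈ F', ¬ x.1 ∣ 1 := by
    intro x hx h1
    have := (hprime' x hx).1.one_lt
    have := Nat.le_of_dvd one_pos h1
    omega
  have hprod' : (F'.map (fun y => y.1 ^ y.2)).prod = m := by
    rw [hF']
    by_cases hr1 : 1 < r
    · rw [if_pos hr1, List.map_append, List.prod_append]
      simp
      rw [hprod]
      ring
    · rw [if_neg hr1]
      have : r = 1 := by omega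
      rw [hprod, this, one_mul]
  obtain ⟨hndD, hmemD⟩ := divFold_aux F' 1 [1] one_pos (by simp)
    (by intro x; simp [Nat.dvd_one]) hprime' hnd' hdvd1
  have hmemD' : ∀ x, x ∈ F'.foldl divStep [1] ↔ x ∣ m := by
    intro x
    rw [hmemD x, one_mul, hprod']
  rw [show ([(1 : Int)] : List Int) = ([1] : List Nat).map (fun d : Nat => (d : Int)) by simp,
    fold_cast]
  apply PySem.List.sorted_eq_of_perm_of_pairwise_lt
  · apply List.perm_of_nodup_nodup_toFinset_eq
    · apply List.Pairwise.nodup (r := (· < ·))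
      apply List.pairwise_cons.mpr
      refine ⟨?_, sList_pairwise m hm2⟩
      intro b hb
      obtain ⟨d, h2d, _, rfl⟩ := (mem_sList m hm2 b).mp hb
      exact_mod_cast h2d
    · exact List.Nodup.map (fun a b hab => by exact_mod_cast hab) hndD
    · ext x
      simp only [List.mem_toFinset, List.mem_cons, List.mem_map]
      constructor
      · rintro (rfl | hx)
        · exact ⟨1, (hmemD' 1).mpr (one_dvd m), rfl⟩
        · obtain ⟨d, h2d, hdvd, rfl⟩ := (mem_sList m hm2 x).mp hx
          exact ⟨d, (hmemD' d).mpr hdvd, rfl⟩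
      · rintro ⟨d, hd, rfl⟩
        have hdvd : d ∣ m := (hmemD' d).mp hd
        have hd0 : 0 < d := Nat.pos_of_dvd_of_pos hdvd hm0
        by_cases hd1 : d = 1
        · left; rw [hd1]; rfl
        · right
          exact (mem_sList m hm2 _).mpr ⟨d, by omega, hdvd, rfl⟩
  · apply List.pairwise_cons.mpr
    refine ⟨?_, sList_pairwise m hm2⟩
    intro b hb
    obtain ⟨d, h2d, _, rfl⟩ := (mem_sList m hm2 b).mp hb
    exact_mod_cast h2d

-- assemble: both tails agree for every non-negative gcd value
lemma main_eq (g : Int) (hg : 0 ≤ g) :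
    PySem.Str.join " "
        ((PySem.List.sorted
            ((PySem.List.pyRange 2 ((Nat.sqrt g.toNat : Int) + 1) 1).foldl
              (fun ans i =>
                if PySem.Int.mod g i = 0 then
                  let ans := ans ++ [i]
                  if i ≠ PySem.Int.floordiv g i then ans ++ [PySem.Int.floordiv g i] else ans
                else ans) [g]) (fun x => x) false).map PySem.Int.toStr)
      = if g < 2 then PySem.Int.toStr g
        else
          PySem.Str.join " "
            (((PySem.List.sorted
                ((if 1 < (altFac g 2).2 then (altFac g 2).1 ++ [((altFac g 2).2, 1)]
                  else (altFac g 2).1).foldl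
                  (fun divs pe => divs.flatMap (fun d => (PySem.List.pyRange 0 (pe.2 + 1) 1).map (fun k => d * pe.1 ^ k.toNat)))
                  [1]) (fun x => x) false).drop 1).map PySem.Int.toStr) := by
  obtain ⟨m, rfl⟩ : ∃ m : Nat, g = (m : Int) := ⟨g.toNat, (Int.toNat_of_nonneg hg).symm⟩
  by_cases hm2 : m < 2
  · interval_cases m <;> decide
  · rw [not_lt] at hm2
    rw [if_neg (by omega : ¬ ((m : Int) < 2))]
    rw [A_answer_flatMap]
    simp only [Int.toNat_natCast, List.singleton_append]
    rw [sorted_core m hm2, sorted_divisors m hm2]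
    simp

-- ===== VERDICT (by name: the statement is the Claim_ definition above) =====
theorem spot_check_spec : Claim_equal_spot_check := by
  intro n nl _ hpre
  show spot_check n nl = spot_check_alt n nl
  unfold spot_check spot_check_alt
  simp only [PySem.List.foldl_append_singleton_eq_map, List.nil_append]
  exact main_eq _ (gcd_fold_nonneg _)
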